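-- pv_equiv track=rewrite | github.com/tainenko/Leetcode2019 | leetcode/editor/en/[1974]Minimum Time to Type Word Using Special Typewriter.py | minTimeToType
-- ===== SOURCE A (Python) =====
-- def minTimeToType(word: str) -> int:
--     res = 0
--     point = 'a'
--     for letter in word:
--         res += 1
--         if letter == point:
--             continue
--         else:
--             dist = abs(ord(letter) - ord(point))
--             res += min(dist, 26 - dist)
--             point = letter
--     return res
-- ===== SOURCE B (Python) =====
-- def minTimeToType(word: str) -> int:
--     def step(p, c):
--         d = abs(ord(c) - ord(p))
--         return min(d, 26 - d)
--
--     def pairs(lo, hi):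
--         # sum of step(word[i-1], word[i]) for lo < i < hi, by divide and conquer
--         if hi - lo < 2:
--             return 0
--         mid = (lo + hi) // 2
--         return pairs(lo, mid) + step(word[mid - 1], word[mid]) + pairs(mid, hi)
--
--     if not word:
--         return 0
--     return len(word) + step('a', word[0]) + pairs(0, len(word))
-- ===== Notes on version B (the rewrite author's own statement) =====
-- stated objective: alternative
-- what changed: Replaces A's left-to-right (res, point) accumulator loop by a non-sequential decomposition: len(word) plus the initial-pointer step, plus a divide-and-conquer recursion that splits the index interval in half and sums the consecutive-pair rotation costs, with no carried pointer state and no equality special case.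
import Mathlib
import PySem

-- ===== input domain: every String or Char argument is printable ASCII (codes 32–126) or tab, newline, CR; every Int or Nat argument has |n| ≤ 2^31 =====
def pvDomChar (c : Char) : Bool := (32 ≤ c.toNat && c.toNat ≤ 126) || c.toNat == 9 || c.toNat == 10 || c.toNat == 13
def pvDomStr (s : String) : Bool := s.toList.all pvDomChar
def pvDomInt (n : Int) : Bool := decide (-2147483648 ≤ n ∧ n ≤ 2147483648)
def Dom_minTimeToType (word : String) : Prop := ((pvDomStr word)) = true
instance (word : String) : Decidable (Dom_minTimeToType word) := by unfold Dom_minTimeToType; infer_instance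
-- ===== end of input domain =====

-- B replaces A's left-to-right (res, point) accumulator loop by len(word) plus the initial-pointer step
-- plus a divide-and-conquer sum of the consecutive-pair rotation costs (objective: alternative).

-- ===== PORT A =====
-- literal port of A's loop: state (res, point), branch on letter == point
def minTimeToType (word : String) : Int :=
  (word.toList.foldl (fun (st : Int × Char) letter =>
    let res := st.1 + 1
    if letter == st.2 then (res, st.2)
    else
      let dist : Int := ((letter.toNat : Int) - (st.2.toNat : Int)).natAbs
      (res + min dist (26 - dist), letter)) (0, 'a')).1

-- ===== PORT B =====
-- Source B's step(p, c)
def pvStep (p c : Char) : Int :=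
  let d : Int := ((c.toNat : Int) - (p.toNat : Int)).natAbs
  min d (26 - d)

-- Source B's pairs(lo, hi): divide-and-conquer sum of step(word[i-1], word[i]) for lo < i < hi
-- (the indices word[mid-1], word[mid] are always in range when pairs is called as in Source B)
def pvPairs (l : List Char) (lo hi : Nat) : Int :=
  if hi < lo + 2 then 0
  else
    let mid := (lo + hi) / 2
    pvPairs l lo mid + pvStep (l.getD (mid - 1) 'a') (l.getD mid 'a') + pvPairs l mid hi
termination_by hi - lo
decreasing_by all_goals omega

-- literal port of Source B: empty → 0, else len + step('a', word[0]) + pairs(0, len)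
def minTimeToType_alt (word : String) : Int :=
  let l := word.toList
  if l.isEmpty then 0
  else (l.length : Int) + pvStep 'a' (l.getD 0 'a') + pvPairs l 0 l.length

-- ===== PRECONDITION & SPEC =====
def Spec_minTimeToType (word : String) (out : Int) : Prop := out = minTimeToType_alt word
instance (word : String) (out : Int) : Decidable (Spec_minTimeToType word out) := by unfold Spec_minTimeToType; infer_instance

-- ===== CLAIM (what is proved, stated in full; the proofs are below) =====
def Claim_equal_minTimeToType : Prop := ∀ (word : String), Dom_minTimeToType word → Spec_minTimeToType word (minTimeToType word)

-- ===== LEMMAS AND PROOFS =====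

-- chain sum: cost of typing l starting with pointer at p (characterises A's loop)
def pvChain (p : Char) : List Char → Int
  | [] => 0
  | c :: t => pvStep p c + pvChain c t

lemma pvStep_self (p : Char) : pvStep p p = 0 := by
  simp [pvStep]

-- A's fold computes res + length + chain sum
lemma pvFold_eq (l : List Char) (res : Int) (p : Char) :
    (l.foldl (fun (st : Int × Char) letter =>
      let r := st.1 + 1
      if letter == st.2 then (r, st.2)
      else
        let dist : Int := ((letter.toNat : Int) - (st.2.toNat : Int)).natAbs
        (r + min dist (26 - dist), letter)) (res, p)).1
    = res + l.length + pvChain p l := by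
  induction l generalizing res p with
  | nil => simp [pvChain]
  | cons c t ih =>
    simp only [List.foldl_cons]
    by_cases h : c = p
    · subst h
      simp only [beq_self_eq_true, if_true, ih, pvChain, pvStep_self,
        List.length_cons, Nat.cast_add, Nat.cast_one]
      ring
    · rw [show (c == p) = false from beq_eq_false_iff_ne.mpr h]
      simp only [Bool.false_eq_true, if_false, ih, pvChain, pvStep,
        List.length_cons, Nat.cast_add, Nat.cast_one]
      ring

-- the chain sum as an indexed sum over the previous list (p :: l)
lemma pvChain_eq_sum (l : List Char) (p : Char) :
    pvChain p l = ∑ i ∈ Finset.range l.length,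
      pvStep ((p :: l).getD i 'a') (l.getD i 'a') := by
  induction l generalizing p with
  | nil => simp [pvChain]
  | cons c t ih =>
    rw [show (c :: t).length = t.length + 1 from rfl, Finset.sum_range_succ']
    simp only [pvChain, ih c, List.getD_cons_succ, List.getD_cons_zero]
    ring

-- pvPairs sums the consecutive-pair costs over the open interval (lo, hi)
lemma pvPairs_eq_sum (l : List Char) (lo hi : Nat) :
    pvPairs l lo hi = ∑ i ∈ Finset.Ico (lo + 1) hi,
      pvStep (l.getD (i - 1) 'a') (l.getD i 'a') := by
  by_cases h : hi < lo + 2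
  · rw [pvPairs, if_pos h, Finset.Ico_eq_empty (by omega), Finset.sum_empty]
  · rw [pvPairs, if_neg h]
    show pvPairs l lo ((lo + hi) / 2)
        + pvStep (l.getD ((lo + hi) / 2 - 1) 'a') (l.getD ((lo + hi) / 2) 'a')
        + pvPairs l ((lo + hi) / 2) hi = _
    have hmid : lo + 1 ≤ (lo + hi) / 2 ∧ (lo + hi) / 2 + 1 ≤ hi := by omega
    rw [pvPairs_eq_sum l lo ((lo + hi) / 2), pvPairs_eq_sum l ((lo + hi) / 2) hi,
      ← Finset.sum_Ico_consecutive _ (show lo + 1 ≤ (lo + hi) / 2 from hmid.1)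
        (show (lo + hi) / 2 ≤ hi by omega),
      Finset.sum_eq_sum_Ico_succ_bot (show (lo + hi) / 2 < hi by omega)]
    ring
termination_by hi - lo
decreasing_by all_goals omega

-- ===== VERDICT (by name: the statement is the Claim_ definition above) =====
theorem minTimeToType_spec : Claim_equal_minTimeToType := by
  intro word _
  unfold Spec_minTimeToType minTimeToType minTimeToType_alt
  rw [pvFold_eq]
  cases hl : word.toList with
  | nil => simp [pvChain]
  | cons c t =>
    simp only [List.isEmpty_cons, Bool.false_eq_true, if_false]
    rw [pvChain_eq_sum, pvPairs_eq_sum,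
      show (c :: t).length = t.length + 1 from rfl,
      show (0 : ℕ) + 1 = 1 from rfl]
    rw [Finset.range_eq_Ico, Finset.sum_eq_sum_Ico_succ_bot (by omega)]
    simp only [List.getD_cons_zero, Nat.zero_add]
    have : ∀ i ∈ Finset.Ico 1 (t.length + 1),
        pvStep (('a' :: c :: t).getD i 'a') ((c :: t).getD i 'a')
        = pvStep ((c :: t).getD (i - 1) 'a') ((c :: t).getD i 'a') := by
      intro i hi
      rcases Nat.exists_eq_add_of_le (Finset.mem_Ico.mp hi).1 with ⟨j, rfl⟩
      simp [Nat.add_comm 1 j]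
    rw [Finset.sum_congr rfl this]
    ring
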